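-- pv_equiv track=rewrite | github.com/Vijayjayavel/excercise | Lib/string/indexmatchwithaplha.py | count_chrmatch
-- ===== SOURCE A (Python) =====
-- import string
--
-- low=list(string.ascii_lowercase)
--
-- upp=list(string.ascii_uppercase)
--
-- def count_chrmatch(string):
--     x=[*string]
--     count=0
--     for i in string:
--         if i.isupper()==True:
--             if upp.index(i)==x.index(i):
--                 count+=1
--         elif i.islower()==True:
--             if low.index(i)==x.index(i):
--                 count+=1
--     return count
-- ===== SOURCE B (Python) =====
-- import string
--
-- low = list(string.ascii_lowercase)
-- upp = list(string.ascii_uppercase)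
--
-- def count_chrmatch(string):
--     # pass 1: first-occurrence index and frequency of every character
--     first = {}
--     freq = {}
--     for idx, ch in enumerate(string):
--         if ch not in first:
--             first[ch] = idx
--         freq[ch] = freq.get(ch, 0) + 1
--     # pass 2: one check per DISTINCT character, weighted by its frequency
--     count = 0
--     for ch, fi in first.items():
--         if ch.isupper():
--             if upp.index(ch) == fi:
--                 count += freq[ch]
--         elif ch.islower():
--             if low.index(ch) == fi:
--                 count += freq[ch]
--     return count
-- ===== Notes on version B (the rewrite author's own statement) =====
-- stated objective: faster
-- what changed: B replaces A's per-occurrence loop with its O(n) x.index rescan by two staged passes: one pass builds first-occurrence and frequency dicts, then a second loop over the DISTINCT characters tests each once and adds its whole frequency, instead of testing every occurrence.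
import Mathlib
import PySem

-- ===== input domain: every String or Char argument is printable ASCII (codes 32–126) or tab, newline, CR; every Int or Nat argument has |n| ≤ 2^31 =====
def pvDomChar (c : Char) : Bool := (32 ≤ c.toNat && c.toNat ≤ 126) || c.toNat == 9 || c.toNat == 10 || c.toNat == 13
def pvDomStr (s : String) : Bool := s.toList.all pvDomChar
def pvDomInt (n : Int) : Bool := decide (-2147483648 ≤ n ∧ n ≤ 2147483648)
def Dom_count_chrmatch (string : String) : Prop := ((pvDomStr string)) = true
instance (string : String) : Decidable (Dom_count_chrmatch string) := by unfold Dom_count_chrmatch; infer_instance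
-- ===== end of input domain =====

-- B replaces A's per-occurrence loop (with its linear x.index rescan) by two staged passes:
-- one pass building first-occurrence and frequency dicts, then one check per DISTINCT
-- character weighted by its frequency (objective: faster).

-- module-level constants: low = list(string.ascii_lowercase), upp = list(string.ascii_uppercase)
def pvLow : List Char := "abcdefghijklmnopqrstuvwxyz".toList
def pvUpp : List Char := "ABCDEFGHIJKLMNOPQRSTUVWXYZ".toList

-- ===== PORT A =====
-- On Dom (ASCII) both .index calls inside a taken branch always succeed, so the Option
-- comparison `index? … = index? …` is exactly Python's int comparison there.
def count_chrmatch (string : String) : Int :=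
  let x := string.toList
  x.foldl (fun count i =>
    if PySem.Chars.isupper i then
      (if PySem.List.index? pvUpp i = PySem.List.index? x i then count + 1 else count)
    else if PySem.Chars.islower i then
      (if PySem.List.index? pvLow i = PySem.List.index? x i then count + 1 else count)
    else count) 0

-- ===== PORT B =====
-- pass 1 state = (first : dict char → int, freq : dict char → int); pass 2 folds over
-- first.items(). `upp.index(ch) == fi` is the Option/Int comparison below (exact on Dom,
-- where .index in a taken branch always succeeds).
def count_chrmatch_alt (string : String) : Int :=
  let x := string.toList
  let st := (PySem.List.enumerate x 0).foldl
    (fun (st : PySem.Dict Char Int × PySem.Dict Char Int) p =>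
      ((if st.1.contains p.2 then st.1 else st.1.insert p.2 p.1),
       st.2.modify p.2 0 (· + 1)))
    (PySem.Dict.empty, PySem.Dict.empty)
  st.1.items.foldl (fun count q =>
    if PySem.Chars.isupper q.1 then
      (if Option.map (fun (n : Nat) => (n : Int)) (PySem.List.index? pvUpp q.1) = some q.2 then
        count + st.2.getD q.1 0 else count)
    else if PySem.Chars.islower q.1 then
      (if Option.map (fun (n : Nat) => (n : Int)) (PySem.List.index? pvLow q.1) = some q.2 then
        count + st.2.getD q.1 0 else count)
    else count) 0

-- ===== PRECONDITION & SPEC =====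
def Spec_count_chrmatch (string : String) (out : Int) : Prop := out = count_chrmatch_alt string
instance (string : String) (out : Int) : Decidable (Spec_count_chrmatch string out) := by unfold Spec_count_chrmatch; infer_instance

-- ===== CLAIM (what is proved, stated in full; the proofs are below) =====
def Claim_equal_count_chrmatch : Prop := ∀ (string : String), Dom_count_chrmatch string → Spec_count_chrmatch string (count_chrmatch string)

-- ===== LEMMAS AND PROOFS =====

-- the per-character test both programs decide (w.r.t. the full character list x)
def pvP (x : List Char) (c : Char) : Bool :=
  if PySem.Chars.isupper c then PySem.List.index? pvUpp c == PySem.List.index? x c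
  else if PySem.Chars.islower c then PySem.List.index? pvLow c == PySem.List.index? x c
  else false

-- A's loop counts the occurrences passing the test
theorem pvA_loop (x : List Char) (l : List Char) (count : Int) :
    l.foldl (fun count i =>
      if PySem.Chars.isupper i then
        (if PySem.List.index? pvUpp i = PySem.List.index? x i then count + 1 else count)
      else if PySem.Chars.islower i then
        (if PySem.List.index? pvLow i = PySem.List.index? x i then count + 1 else count)
      else count) count = count + (l.countP (pvP x) : Int) := by
  induction l generalizing count with
  | nil => simp
  | cons c l ih =>
    simp only [List.foldl_cons, List.countP_cons, ih, pvP]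
    by_cases hu : PySem.Chars.isupper c = true <;>
      by_cases hl : PySem.Chars.islower c = true <;>
        simp [hu, hl] <;> split_ifs <;> simp_all <;> omega

theorem pvOfListAppend (xs : List Char) (c : Char) :
    PySem.Set.ofList (xs ++ [c]) =
      if c ∈ xs then PySem.Set.ofList xs else PySem.Set.ofList xs ++ [c] := by
  rw [PySem.Set.ofList_eq_foldl, List.foldl_append]
  rw [show List.foldl PySem.Set.add [] xs = PySem.Set.ofList xs from (PySem.Set.ofList_eq_foldl xs).symm]
  simp [PySem.Set.add, PySem.Set.contains, PySem.Set.mem_ofList]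

-- the `first` dict after the pass: distinct chars in first-occurrence order,
-- each mapped to its first index in x
theorem pvFirst_items (x : List Char) : ∀ (suf pre : List Char) (d : PySem.Dict Char Int),
    x = pre ++ suf →
    d.items = (PySem.Set.ofList pre).map (fun c => (c, ((PySem.List.index? x c).getD 0 : Int))) →
    ((PySem.List.enumerate suf (pre.length : Int)).foldl
      (fun d (p : Int × Char) => if d.contains p.2 then d else d.insert p.2 p.1) d).items
    = (PySem.Set.ofList x).map (fun c => (c, ((PySem.List.index? x c).getD 0 : Int))) := by
  intro suf
  induction suf with
  | nil =>
    intro pre d hx hd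
    have : pre = x := by simpa using hx.symm
    subst this
    simpa [PySem.List.enumerate_nil] using hd
  | cons c suf ih =>
    intro pre d hx hd
    rw [PySem.List.enumerate_cons, List.foldl_cons]
    have hkeys : d.keys = PySem.Set.ofList pre := by
      show d.items.map (·.1) = _
      rw [hd, List.map_map]; simp [Function.comp_def]
    have hcont : d.contains c = decide (c ∈ pre) := by
      rw [PySem.Dict.contains_eq_decide_mem_keys, hkeys]
      simp [PySem.Set.mem_ofList]
    by_cases hc : c ∈ pre
    · have hx' : x = (pre ++ [c]) ++ suf := by simpa using hx
      have hd' : d.items = (PySem.Set.ofList (pre ++ [c])).map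
          (fun c => (c, ((PySem.List.index? x c).getD 0 : Int))) := by
        rw [pvOfListAppend, if_pos hc]; exact hd
      have := ih (pre ++ [c]) d hx' hd'
      simp only [hcont, hc, decide_true, if_true]
      simpa [List.length_append] using this
    · have hidx : PySem.List.index? x c = some pre.length := by
        rw [PySem.List.index?_eq_some_iff]
        exact ⟨pre, suf, hx, rfl, hc⟩
      have hcontf : d.contains c = false := by rw [hcont]; simp [hc]
      have hx' : x = (pre ++ [c]) ++ suf := by simpa using hx
      have hd' : (d.insert c (pre.length : Int)).items = (PySem.Set.ofList (pre ++ [c])).map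
          (fun c => (c, ((PySem.List.index? x c).getD 0 : Int))) := by
        rw [PySem.Dict.items_insert_of_not_contains _ _ hcontf, pvOfListAppend, if_neg hc,
          List.map_append, hd]
        simp only [List.map_cons, List.map_nil, hidx, Option.getD_some]
      have := ih (pre ++ [c]) (d.insert c (pre.length : Int)) hx' hd'
      simp only [hcontf, Bool.false_eq_true, if_false]
      simpa [List.length_append] using this

theorem pvCountFilter (a : Char) (p : Char → Bool) (l : List Char) :
    List.count a (l.filter p) = if p a then l.count a else 0 := by
  by_cases hp : p a
  · rw [List.count_filter hp, if_pos hp]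
  · rw [if_neg hp, List.count_eq_zero]
    simp [List.mem_filter, hp]

-- grouping: summing `count` over the distinct characters passing the test is countP
theorem pvSumKeyNat (x : List Char) (p : Char → Bool) :
    ((PySem.Set.ofList x).map (fun c => if p c then x.count c else 0)).sum = x.countP p := by
  have hnd := PySem.Set.nodup_ofList x
  rw [← List.sum_toFinset _ hnd]
  have hfs : (PySem.Set.ofList x).toFinset = x.toFinset := by
    ext a; simp [PySem.Set.mem_ofList]
  have hsub : (x.filter p).toFinset ⊆ x.toFinset := by
    intro a ha; simp only [List.mem_toFinset, List.mem_filter] at *; exact ha.1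
  rw [hfs, List.countP_eq_length_filter]
  calc ∑ a ∈ x.toFinset, (if p a then x.count a else 0)
      = ∑ a ∈ x.toFinset, (x.filter p).count a :=
        Finset.sum_congr rfl (fun a _ => (pvCountFilter a p x).symm)
    _ = ∑ a ∈ (x.filter p).toFinset, (x.filter p).count a :=
        (Finset.sum_subset hsub (fun a _ hna => by
          rw [List.count_eq_zero]; simpa using hna)).symm
    _ = (x.filter p).length := List.sum_toFinset_count_eq_length _

theorem pvSumKey (x : List Char) (p : Char → Bool) :
    ((PySem.Set.ofList x).map (fun c => if p c then (x.count c : Int) else 0)).sum = (x.countP p : Int) := by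
  rw [← pvSumKeyNat x p, Nat.cast_list_sum, List.map_map]
  exact congrArg List.sum (List.map_congr_left (fun c _ => by by_cases hp : p c <;> simp [hp]))

-- the freq pass is Counter(x)
theorem pvFreq_eq (x : List Char) :
    (PySem.List.enumerate x 0).foldl (fun (d : PySem.Dict Char Int) p => d.modify p.2 0 (· + 1))
      PySem.Dict.empty = PySem.Dict.counter x := by
  rw [PySem.Dict.counter_eq_foldl]
  conv_rhs => rw [← PySem.List.map_snd_enumerate x 0, List.foldl_map]

-- instance of pvFirst_items for the actual starting state of the pass
theorem pvFirst_items0 (x : List Char) :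
    ((PySem.List.enumerate x 0).foldl
      (fun d (p : Int × Char) => if d.contains p.2 then d else d.insert p.2 p.1)
      (PySem.Dict.empty : PySem.Dict Char Int)).items
    = (PySem.Set.ofList x).map (fun c => (c, ((PySem.List.index? x c).getD 0 : Int))) := by
  have := pvFirst_items x x [] PySem.Dict.empty (by simp) (by simp [PySem.Dict.empty])
  simpa using this

-- B's second loop over the (char, first-index) pairs, with freq abstracted
theorem pvB_fold (x : List Char) (freq : PySem.Dict Char Int)
    (hfreq : ∀ c, freq.getD c 0 = (x.count c : Int)) :
    ∀ (d : List Char), (∀ c ∈ d, c ∈ x) → ∀ (count : Int),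
    (d.map (fun c => (c, ((PySem.List.index? x c).getD 0 : Int)))).foldl
      (fun count q =>
        if PySem.Chars.isupper q.1 then
          (if Option.map (fun (n : Nat) => (n : Int)) (PySem.List.index? pvUpp q.1) = some q.2 then
            count + freq.getD q.1 0 else count)
        else if PySem.Chars.islower q.1 then
          (if Option.map (fun (n : Nat) => (n : Int)) (PySem.List.index? pvLow q.1) = some q.2 then
            count + freq.getD q.1 0 else count)
        else count) count
    = count + ((d.map (fun c => if pvP x c then (x.count c : Int) else 0)).sum) := by
  intro d
  induction d with
  | nil => simp
  | cons c d ih =>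
    intro hmem count
    obtain ⟨n, hn⟩ := Option.isSome_iff_exists.mp
      ((PySem.List.index?_isSome_iff _ _).mpr (hmem c (by simp)))
    simp only [List.map_cons, List.foldl_cons, List.sum_cons]
    rw [ih (fun c hc => hmem c (List.mem_cons_of_mem _ hc))]
    simp only [pvP, hn, Option.getD_some, hfreq]
    by_cases hu : PySem.Chars.isupper c = true <;>
      by_cases hl : PySem.Chars.islower c = true <;>
        simp [hu, hl] <;> split_ifs <;> simp_all <;> omega

theorem count_chrmatch_spec : Claim_equal_count_chrmatch := by
  intro s _
  unfold Spec_count_chrmatch count_chrmatch count_chrmatch_alt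
  dsimp only
  rw [pvA_loop s.toList s.toList 0]
  rw [PySem.List.foldl_prod_mk
    (f := fun (d : PySem.Dict Char Int) (p : Int × Char) =>
      if d.contains p.2 then d else d.insert p.2 p.1)
    (g := fun (d : PySem.Dict Char Int) (p : Int × Char) => d.modify p.2 0 (· + 1))]
  dsimp only
  rw [pvFreq_eq, pvFirst_items0 s.toList]
  rw [pvB_fold s.toList (PySem.Dict.counter s.toList)
    (fun c => by rw [PySem.Dict.getD_counter])
    (PySem.Set.ofList s.toList) (fun c hc => by simpa [PySem.Set.mem_ofList] using hc) 0]
  rw [pvSumKey]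

-- ===== VERDICT (by name: the statement is the Claim_ definition above) =====
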